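-- pv_equiv track=rewrite | github.com/Anjan0723/gui_design | gui_design.py | find_nearest_r1
-- ===== SOURCE A (Python) =====
-- R1_OPTIONS_VALUES = [417000 - 12770 * n for n in range(32)]
--
-- def find_nearest_r1(calc_r1_ohm):
--     """Find the smallest valid R1 value >= calculated value."""
--     if calc_r1_ohm is None or calc_r1_ohm <= 0:
--         return None
--     # Find the smallest value >= calc_r1_ohm (search from low to high values)
--     # R1_OPTIONS_VALUES is descending: [417k, 404k, 391k, ..., 21k]
--     # We want the closest value that is >= calc_r1 (should be near the end for small calc_r1)
--     best_idx = None
--     for i, val in enumerate(R1_OPTIONS_VALUES):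
--         if val >= calc_r1_ohm:
--             best_idx = i  # Keep updating to get the last (smallest) valid one
--     return best_idx if best_idx is not None else 0
-- ===== SOURCE B (Python) =====
-- def find_nearest_r1(calc_r1_ohm):
--     """Find the smallest valid R1 value >= calculated value (closed form)."""
--     if calc_r1_ohm is None or calc_r1_ohm <= 0:
--         return None
--     if calc_r1_ohm > 417000:
--         return 0
--     return min(31, (417000 - calc_r1_ohm) // 12770)
-- ===== Notes on version B (the rewrite author's own statement) =====
-- stated objective: simpler
-- what changed: Replaces the linear scan over the preset R1 value list by a closed-form floor-division formula clamped to the last index, returning the first index when even the largest preset is below the calculated value.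
import Mathlib
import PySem

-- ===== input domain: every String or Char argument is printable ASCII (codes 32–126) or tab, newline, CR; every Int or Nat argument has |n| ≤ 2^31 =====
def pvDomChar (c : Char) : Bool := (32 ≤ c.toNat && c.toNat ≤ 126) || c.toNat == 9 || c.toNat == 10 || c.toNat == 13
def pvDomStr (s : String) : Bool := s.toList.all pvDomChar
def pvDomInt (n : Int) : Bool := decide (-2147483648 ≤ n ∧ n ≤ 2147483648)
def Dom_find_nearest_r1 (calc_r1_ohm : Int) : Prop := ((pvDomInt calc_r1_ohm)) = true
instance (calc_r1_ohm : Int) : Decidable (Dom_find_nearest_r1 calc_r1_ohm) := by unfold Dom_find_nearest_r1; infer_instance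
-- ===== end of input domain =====

-- B replaces A's linear scan of the preset value list by a closed-form floor-division formula (simpler).

-- ===== PORT A =====
-- R1_OPTIONS_VALUES = [417000 - 12770 * n for n in range(32)]
def R1_OPTIONS_VALUES : List Int := (PySem.List.pyRange 0 32 1).map (fun n => 417000 - 12770 * n)

def find_nearest_r1 (calc_r1_ohm : Int) : Option Int :=
  if calc_r1_ohm ≤ 0 then none
  else
    -- for i, val in enumerate(...): if val >= calc: best_idx = i
    let best_idx : Option Int :=
      (PySem.List.enumerate R1_OPTIONS_VALUES).foldl
        (fun best_idx iv => if iv.2 ≥ calc_r1_ohm then some iv.1 else best_idx) none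
    some (best_idx.getD 0)

-- ===== PORT B =====
def find_nearest_r1_alt (calc_r1_ohm : Int) : Option Int :=
  if calc_r1_ohm ≤ 0 then none
  else if calc_r1_ohm > 417000 then some 0
  else some (min 31 (PySem.Int.floordiv (417000 - calc_r1_ohm) 12770))

-- ===== PRECONDITION & SPEC =====
def Spec_find_nearest_r1 (calc_r1_ohm : Int) (out : Option Int) : Prop := out = find_nearest_r1_alt calc_r1_ohm
instance (calc_r1_ohm : Int) (out : Option Int) : Decidable (Spec_find_nearest_r1 calc_r1_ohm out) := by unfold Spec_find_nearest_r1; infer_instance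

-- ===== CLAIM (what is proved, stated in full; the proofs are below) =====
def Claim_equal_find_nearest_r1 : Prop := ∀ (calc_r1_ohm : Int), Dom_find_nearest_r1 calc_r1_ohm → Spec_find_nearest_r1 calc_r1_ohm (find_nearest_r1 calc_r1_ohm)

-- ===== LEMMAS AND PROOFS =====

-- The loop over the first n preset values keeps the LAST qualifying index:
-- none if nothing qualifies, else min (n-1) ((417000-c)/12770).
lemma pv_loop_char (c : Int) (n : Nat) :
    ((List.range n).map (fun k : Nat => ((k : Int), 417000 - 12770 * (k : Int)))).foldl
      (fun b iv => if iv.2 ≥ c then some iv.1 else b) none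
    = if 0 ≤ 417000 - c ∧ 1 ≤ n then
        some (min ((n : Int) - 1) ((417000 - c) / 12770)) else none := by
  induction n with
  | zero => simp
  | succ n ih =>
    rw [List.range_succ, List.map_append, List.foldl_append, ih]
    simp only [List.map_cons, List.map_nil, List.foldl_cons, List.foldl_nil]
    by_cases hq : 417000 - 12770 * (n : Int) ≥ c
    · simp only [hq, if_pos]
      have hk : (n : Int) ≤ (417000 - c) / 12770 := by omega
      rw [if_pos ⟨by omega, by omega⟩]
      congr 1
      push_cast
      rw [add_sub_cancel_right]
      exact (min_eq_left hk).symm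
    · rw [if_neg hq]
      split_ifs with h1 h2 h2
      · congr 1; omega
      · omega
      · omega
      · rfl

-- ===== VERDICT (by name: the statement is the Claim_ definition above) =====
theorem find_nearest_r1_spec : Claim_equal_find_nearest_r1 := by
  intro c _
  unfold Spec_find_nearest_r1 find_nearest_r1 find_nearest_r1_alt R1_OPTIONS_VALUES
  by_cases hc : c ≤ 0
  · simp [hc]
  · have he : PySem.List.enumerate ((PySem.List.pyRange 0 32 1).map (fun n => 417000 - 12770 * n)) =
        (List.range 32).map (fun k : Nat => ((k : Int), 417000 - 12770 * (k : Int))) := by decide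
    rw [PySem.Int.floordiv_eq_ediv_of_pos (by norm_num)]
    simp only [hc, if_false, he, pv_loop_char]
    split_ifs with h1 h2 h2 <;>
      simp only [Option.getD_none, Option.getD_some, Option.some.injEq] <;> omega
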